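-- pv_equiv track=rewrite | github.com/deniskirbaba/python-learning | yandex-python-handbook/3-5-iostreams-work-with-files/divide_and_conquer.py | analyze_digits
-- ===== SOURCE A (Python) =====
-- def analyze_digits(n):
--     even_count = 0
--     odd_count = 0
--     while n > 0:
--         if (n % 10) % 2 == 0:
--             even_count += 1
--         else:
--             odd_count += 1
--         n = n // 10
--     if even_count > odd_count:
--         return 'even'
--     elif odd_count > even_count:
--         return 'odd'
--     else:
--         return 'eq'
-- ===== SOURCE B (Python) =====
-- def analyze_digits(n):
--     evens = 0
--     odds = 0
--     if n > 0:
--         s = str(n)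
--         evens = sum(1 for ch in s if ch in '02468')
--         odds = len(s) - evens
--     if evens > odds:
--         return 'even'
--     if odds > evens:
--         return 'odd'
--     return 'eq'
-- ===== Notes on version B (the rewrite author's own statement) =====
-- stated objective: idiomatic
-- what changed: B counts even digits by scanning the decimal string representation str(n) instead of extracting digits with an arithmetic modulus/division loop, deriving the odd count as the length minus the even count.
import Mathlib
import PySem

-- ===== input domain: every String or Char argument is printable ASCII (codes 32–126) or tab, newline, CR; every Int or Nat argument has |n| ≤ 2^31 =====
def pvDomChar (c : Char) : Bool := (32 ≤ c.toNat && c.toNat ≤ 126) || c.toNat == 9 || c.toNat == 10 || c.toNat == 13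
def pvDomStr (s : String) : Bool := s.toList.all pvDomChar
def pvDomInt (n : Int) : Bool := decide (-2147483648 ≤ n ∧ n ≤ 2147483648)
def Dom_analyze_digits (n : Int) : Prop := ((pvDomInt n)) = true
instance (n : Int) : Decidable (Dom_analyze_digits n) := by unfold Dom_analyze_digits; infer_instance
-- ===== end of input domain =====

-- B replaces A's arithmetic digit-extraction loop by a single scan of the decimal string str(n), deriving odds as len minus evens (idiomatic, same cost).

-- ===== PORT A =====
-- the while loop of A, state (even_count, odd_count)
def analyzeLoop (n e o : Int) : Int × Int :=
  if h : 0 < n then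
    if PySem.Int.mod (PySem.Int.mod n 10) 2 = 0 then
      analyzeLoop (PySem.Int.floordiv n 10) (e + 1) o
    else
      analyzeLoop (PySem.Int.floordiv n 10) e (o + 1)
  else (e, o)
termination_by n.toNat
decreasing_by
  all_goals
    simp only [PySem.Int.floordiv, Int.fdiv_eq_ediv_of_nonneg _ (by norm_num : (0:Int) ≤ 10)]
    omega

def analyze_digits (n : Int) : String :=
  let p := analyzeLoop n 0 0
  if p.1 > p.2 then "even" else if p.2 > p.1 then "odd" else "eq"

-- ===== PORT B =====
def analyze_digits_alt (n : Int) : String :=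
  let p : Int × Int :=
    if 0 < n then
      let s := PySem.Int.toChars n
      let evens : Int :=
        (s.countP fun c => c == '0' || c == '2' || c == '4' || c == '6' || c == '8')
      (evens, (s.length : Int) - evens)
    else (0, 0)
  if p.1 > p.2 then "even" else if p.2 > p.1 then "odd" else "eq"

-- ===== PRECONDITION & SPEC =====
def Spec_analyze_digits (n : Int) (out : String) : Prop := out = analyze_digits_alt n
instance (n : Int) (out : String) : Decidable (Spec_analyze_digits n out) := by unfold Spec_analyze_digits; infer_instance

-- ===== CLAIM (what is proved, stated in full; the proofs are below) =====
def Claim_equal_analyze_digits : Prop := ∀ (n : Int), Dom_analyze_digits n → Spec_analyze_digits n (analyze_digits n)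

-- ===== LEMMAS AND PROOFS =====

-- the decimal character string of m, built back-to-front like Nat.toDigitsCore produces it
def decChars (m : Nat) : List Char :=
  if h : m < 10 then [Nat.digitChar (m % 10)]
  else decChars (m / 10) ++ [Nat.digitChar (m % 10)]
decreasing_by exact Nat.div_lt_self (by omega) (by omega)

-- even/odd digit counts of m via the same digit recursion as A's loop
def countEO (m : Nat) : Nat × Nat :=
  if h : m = 0 then (0, 0)
  else
    let p := countEO (m / 10)
    if m % 10 % 2 = 0 then (p.1 + 1, p.2) else (p.1, p.2 + 1)
decreasing_by exact Nat.div_lt_self (by omega) (by omega)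

lemma toDigitsCore_eq_decChars :
    ∀ (f n : Nat) (acc : List Char), n < f →
      Nat.toDigitsCore 10 f n acc = decChars n ++ acc := by
  intro f
  induction f with
  | zero => intro n acc h; omega
  | succ f ih =>
    intro n acc h
    rw [Nat.toDigitsCore]
    by_cases h10 : n / 10 = 0
    · have hn : n < 10 := by omega
      simp [h10, decChars, hn]
    · have hn : ¬ n < 10 := by omega
      rw [if_neg h10, ih (n / 10) _ (by omega)]
      conv_rhs => rw [decChars]
      rw [dif_neg hn]
      simp

lemma toDigits_eq_decChars (m : Nat) : Nat.toDigits 10 m = decChars m := by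
  have := toDigitsCore_eq_decChars (m + 1) m [] (by omega)
  simpa [Nat.toDigits] using this

lemma evCh_digitChar (d : Nat) (hd : d < 10) :
    ((Nat.digitChar d == '0' || Nat.digitChar d == '2' || Nat.digitChar d == '4' ||
      Nat.digitChar d == '6' || Nat.digitChar d == '8') = true) ↔ d % 2 = 0 := by
  interval_cases d <;> decide

lemma countEO_zero : countEO 0 = (0, 0) := by
  rw [countEO]; simp

lemma countEO_pos (m : Nat) (hm : m ≠ 0) :
    countEO m = (if m % 10 % 2 = 0 then ((countEO (m / 10)).1 + 1, (countEO (m / 10)).2)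
                 else ((countEO (m / 10)).1, (countEO (m / 10)).2 + 1)) := by
  rw [countEO, dif_neg hm]

lemma fdiv10 (n : Int) : PySem.Int.floordiv n 10 = n / 10 := by
  simp [PySem.Int.floordiv, Int.fdiv_eq_ediv_of_nonneg _ (by norm_num : (0:Int) ≤ 10)]

lemma fmod_pos (a : Int) (b : Int) (hb : 0 < b) : PySem.Int.mod a b = a % b := by
  simp [PySem.Int.mod, Int.fmod_eq_emod, Or.inl hb.le]

lemma decChars_counts :
    ∀ m : Nat, 0 < m →
      (decChars m).countP (fun c => c == '0' || c == '2' || c == '4' || c == '6' || c == '8')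
        = (countEO m).1 ∧
      (decChars m).length = (countEO m).1 + (countEO m).2 := by
  intro m
  induction m using Nat.strong_induction_on with
  | _ m ih =>
    intro hm
    have hdec : decChars m
        = (if m < 10 then [] else decChars (m / 10)) ++ [Nat.digitChar (m % 10)] := by
      rw [decChars]; split_ifs with h <;> simp
    have hcnt : countEO m
        = (if m % 10 % 2 = 0 then ((countEO (m / 10)).1 + 1, (countEO (m / 10)).2)
           else ((countEO (m / 10)).1, (countEO (m / 10)).2 + 1)) := by
      rw [countEO, dif_neg (by omega : ¬ m = 0)]
    by_cases h10 : m < 10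
    · have h0 : m / 10 = 0 := by omega
      rw [hdec, hcnt, h0, countEO_zero]
      by_cases hev : m % 10 % 2 = 0
      · have hev2 : m % 2 = 0 := by omega
        have hch := (evCh_digitChar (m % 10) (by omega)).mpr hev
        simp [h10, hev, hev2, List.countP_append, List.countP_cons, hch]
      · have hev2 : ¬ m % 2 = 0 := by omega
        have hch : ¬ ((Nat.digitChar (m % 10) == '0' || Nat.digitChar (m % 10) == '2' ||
            Nat.digitChar (m % 10) == '4' || Nat.digitChar (m % 10) == '6' ||
            Nat.digitChar (m % 10) == '8') = true) := fun hc =>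
          hev ((evCh_digitChar (m % 10) (by omega)).mp hc)
        simp [h10, hev, hev2, List.countP_append, List.countP_cons, hch]
    · have hdiv : 0 < m / 10 := by omega
      obtain ⟨ihc, ihl⟩ := ih (m / 10) (Nat.div_lt_self (by omega) (by omega)) hdiv
      rw [hdec, hcnt]
      by_cases hev : m % 10 % 2 = 0
      · have hev2 : m % 2 = 0 := by omega
        have hch := (evCh_digitChar (m % 10) (by omega)).mpr hev
        constructor
        · simp [h10, hev, hev2, List.countP_append, List.countP_cons, hch, ihc]
        · simp [h10, hev, hev2, List.length_append, ihl]
          omega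
      · have hev2 : ¬ m % 2 = 0 := by omega
        have hch : ¬ ((Nat.digitChar (m % 10) == '0' || Nat.digitChar (m % 10) == '2' ||
            Nat.digitChar (m % 10) == '4' || Nat.digitChar (m % 10) == '6' ||
            Nat.digitChar (m % 10) == '8') = true) := fun hc =>
          hev ((evCh_digitChar (m % 10) (by omega)).mp hc)
        constructor
        · simp [h10, hev, hev2, List.countP_append, List.countP_cons, hch, ihc]
        · simp [h10, hev, hev2, List.length_append, ihl]
          omega

lemma analyzeLoop_eq (n e o : Int) :
    analyzeLoop n e o = (e + ((countEO n.toNat).1 : Int), o + ((countEO n.toNat).2 : Int)) := by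
  induction n, e, o using analyzeLoop.induct with
  | case1 n e o h hev ih =>
    rw [analyzeLoop, dif_pos h, if_pos hev, ih]
    rw [fmod_pos _ _ (by norm_num), fmod_pos _ _ (by norm_num)] at hev
    have hmod : n.toNat % 10 % 2 = 0 := by omega
    have ht : (PySem.Int.floordiv n 10).toNat = n.toNat / 10 := by rw [fdiv10]; omega
    rw [ht]
    conv_rhs => rw [countEO_pos n.toNat (by omega)]
    rw [if_pos hmod]
    simp only [Prod.mk.injEq]
    constructor <;> push_cast <;> ring
  | case2 n e o h hev ih =>
    rw [analyzeLoop, dif_pos h, if_neg hev, ih]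
    rw [fmod_pos _ _ (by norm_num), fmod_pos _ _ (by norm_num)] at hev
    have hmod : ¬ n.toNat % 10 % 2 = 0 := by omega
    have ht : (PySem.Int.floordiv n 10).toNat = n.toNat / 10 := by rw [fdiv10]; omega
    rw [ht]
    conv_rhs => rw [countEO_pos n.toNat (by omega)]
    rw [if_neg hmod]
    simp only [Prod.mk.injEq]
    constructor <;> push_cast <;> ring
  | case3 n e o h =>
    rw [analyzeLoop, dif_neg h]
    have h0 : n.toNat = 0 := by omega
    rw [h0, countEO_zero]
    simp

-- ===== VERDICT (by name: the statement is the Claim_ definition above) =====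
theorem analyze_digits_spec : Claim_equal_analyze_digits := by
  intro n _
  unfold Spec_analyze_digits analyze_digits analyze_digits_alt
  rw [analyzeLoop_eq]
  by_cases h : 0 < n
  · have hm : 0 < n.toNat := by omega
    have hchars : PySem.Int.toChars n = decChars n.toNat := by
      rw [PySem.Int.toChars, if_neg (by omega : ¬ n < 0), toDigits_eq_decChars]
    obtain ⟨hc, hl⟩ := decChars_counts n.toNat hm
    simp only [if_pos h, hchars, hc, hl]
    push_cast
    norm_num
  · simp only [if_neg h]
    have : n.toNat = 0 := by omega
    rw [this, countEO_zero]
    norm_num
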